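-- pv_equiv track=rewrite | github.com/X-LANCE/medical-dataset | generate_dataset/generate_dataset.py | fix_many_foreign_keys
-- ===== SOURCE A (Python) =====
-- def fix_many_foreign_keys(dataset):
--     fixed_foreign_keys = [
--         ('mzjzjlb.YLJGDM = jybgb.YLJGDM', 'mzjzjlb.YLJGDM = jybgb.YLJGDM_MZJZJLB'),
--         ('zyjzjlb.YLJGDM = jybgb.YLJGDM', 'zyjzjlb.YLJGDM = jybgb.YLJGDM_ZYJZJLB'),
--         ('mzjzjlb.JZLSH = jybgb.JZLSH', 'mzjzjlb.JZLSH = jybgb.JZLSH_MZJZJLB'),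
--         ('zyjzjlb.JZLSH = jybgb.JZLSH', 'zyjzjlb.JZLSH = jybgb.JZLSH_ZYJZJLB')
--     ]
--     for i in range(len(dataset)):
--         for fixed_foreign_key in fixed_foreign_keys:
--             dataset[i]['sql'] = dataset[i]['sql'].replace(fixed_foreign_key[0], fixed_foreign_key[1])
--     return dataset
-- ===== SOURCE B (Python) =====
-- def fix_many_foreign_keys(dataset):
--     rules = [
--         ('mzjzjlb.YLJGDM = jybgb.YLJGDM', 'mzjzjlb.YLJGDM = jybgb.YLJGDM_MZJZJLB'),
--         ('zyjzjlb.YLJGDM = jybgb.YLJGDM', 'zyjzjlb.YLJGDM = jybgb.YLJGDM_ZYJZJLB'),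
--         ('mzjzjlb.JZLSH = jybgb.JZLSH', 'mzjzjlb.JZLSH = jybgb.JZLSH_MZJZJLB'),
--         ('zyjzjlb.JZLSH = jybgb.JZLSH', 'zyjzjlb.JZLSH = jybgb.JZLSH_ZYJZJLB')
--     ]
--     for item in dataset:
--         s = item['sql']
--         out = []
--         i = 0
--         n = len(s)
--         while i < n:
--             for old, new in rules:
--                 if s.startswith(old, i):
--                     out.append(new)
--                     i += len(old)
--                     break
--             else:
--                 out.append(s[i])
--                 i += 1
--         item['sql'] = ''.join(out)
--     return dataset
-- ===== Notes on version B (the rewrite author's own statement) =====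
-- stated objective: alternative
-- what changed: B replaces A's four sequential full-string str.replace passes per item by a single left-to-right scan that tries the four (non-overlapping, non-cascading) patterns at each position and emits the replacement in one pass.
import Mathlib
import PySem

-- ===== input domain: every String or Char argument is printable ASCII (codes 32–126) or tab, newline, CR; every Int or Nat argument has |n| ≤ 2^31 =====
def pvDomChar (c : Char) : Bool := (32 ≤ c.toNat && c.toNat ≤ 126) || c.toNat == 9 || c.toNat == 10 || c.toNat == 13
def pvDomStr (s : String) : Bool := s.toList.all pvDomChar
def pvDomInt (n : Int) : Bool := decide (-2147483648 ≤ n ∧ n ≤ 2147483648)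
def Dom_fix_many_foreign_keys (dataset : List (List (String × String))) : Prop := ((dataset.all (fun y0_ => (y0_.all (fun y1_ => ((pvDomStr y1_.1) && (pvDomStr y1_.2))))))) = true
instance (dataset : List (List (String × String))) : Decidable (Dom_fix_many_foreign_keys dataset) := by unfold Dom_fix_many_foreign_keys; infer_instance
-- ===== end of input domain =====

-- B replaces A's four sequential str.replace passes per item by a single left-to-right scan trying the
-- four patterns at each position (objective: alternative, one pass instead of four). Both A and B mutate
-- the dicts of `dataset` in place in Python; the equivalence proved here is about the returned value.

-- ===== PORT A =====
def fkRules : List (String × String) := [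
  ("mzjzjlb.YLJGDM = jybgb.YLJGDM", "mzjzjlb.YLJGDM = jybgb.YLJGDM_MZJZJLB"),
  ("zyjzjlb.YLJGDM = jybgb.YLJGDM", "zyjzjlb.YLJGDM = jybgb.YLJGDM_ZYJZJLB"),
  ("mzjzjlb.JZLSH = jybgb.JZLSH", "mzjzjlb.JZLSH = jybgb.JZLSH_MZJZJLB"),
  ("zyjzjlb.JZLSH = jybgb.JZLSH", "zyjzjlb.JZLSH = jybgb.JZLSH_ZYJZJLB")]

-- one assignment `dataset[i]['sql'] = dataset[i]['sql'].replace(fk[0], fk[1])` applied to the dict at index i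
def pvStepA (item : List (String × String)) (fk : String × String) : List (String × String) :=
  ((PySem.Dict.mk item).insert "sql"
    (PySem.Str.replace ((PySem.Dict.mk item).getD "sql" "") fk.1 fk.2)).items

def fix_many_foreign_keys (dataset : List (List (String × String))) : List (List (String × String)) :=
  (PySem.List.pyRange 0 (dataset.length : Int)).foldl
    (fun ds i =>
      fkRules.foldl
        (fun ds' fk => ds'.set i.toNat (pvStepA (PySem.List.pyGetD ds' i []) fk)) ds)
    dataset

-- ===== PORT B =====
def pvRulesB : List (List Char × List Char) := [
  ("mzjzjlb.YLJGDM = jybgb.YLJGDM".toList, "mzjzjlb.YLJGDM = jybgb.YLJGDM_MZJZJLB".toList),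
  ("zyjzjlb.YLJGDM = jybgb.YLJGDM".toList, "zyjzjlb.YLJGDM = jybgb.YLJGDM_ZYJZJLB".toList),
  ("mzjzjlb.JZLSH = jybgb.JZLSH".toList, "mzjzjlb.JZLSH = jybgb.JZLSH_MZJZJLB".toList),
  ("zyjzjlb.JZLSH = jybgb.JZLSH".toList, "zyjzjlb.JZLSH = jybgb.JZLSH_ZYJZJLB".toList)]

-- the inner `for old, new in rules: if s.startswith(old, i): … break / else: …` of Source B
def pvTryRules : List (List Char × List Char) → List Char → Option (List Char × Nat)
  | [], _ => none
  | pr :: rest, s => if pr.1.isPrefixOf s then some (pr.2, pr.1.length) else pvTryRules rest s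

-- the `while i < n` scan of Source B, emitting the output pieces front to back
def pvScan (rules : List (List Char × List Char)) : List Char → List Char
  | [] => []
  | c :: t =>
    match pvTryRules rules (c :: t) with
    | some (r, n) => r ++ pvScan rules (t.drop (n - 1))
    | none => c :: pvScan rules t
  termination_by s => s.length
  decreasing_by
  · simp
  · simp

def fix_many_foreign_keys_alt (dataset : List (List (String × String))) : List (List (String × String)) :=
  dataset.map (fun item =>
    ((PySem.Dict.mk item).insert "sql"
      (String.ofList (pvScan pvRulesB ((PySem.Dict.mk item).getD "sql" "").toList))).items)

-- ===== PRECONDITION & SPEC =====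
-- Pre_ excludes items without a "sql" key (Python A raises KeyError there, B raises too) and items whose
-- association list has duplicate keys, on which the list does not determine a Python dict (the dict
-- constructor collapses duplicates, so the assoc-list ports and the Python programs cannot be compared).
def Pre_fix_many_foreign_keys (dataset : List (List (String × String))) : Prop :=
  ∀ item ∈ dataset, (item.map Prod.fst).Nodup ∧ "sql" ∈ item.map Prod.fst
instance (dataset : List (List (String × String))) : Decidable (Pre_fix_many_foreign_keys dataset) := by
  unfold Pre_fix_many_foreign_keys; infer_instance

def pvWitness_fix_many_foreign_keys : (List (List (String × String))) :=
  [[("sql", "a mzjzjlb.JZLSH = jybgb.JZLSH b")]]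

def Spec_fix_many_foreign_keys (dataset : List (List (String × String))) (out : List (List (String × String))) : Prop := out = fix_many_foreign_keys_alt dataset
instance (dataset : List (List (String × String))) (out : List (List (String × String))) : Decidable (Spec_fix_many_foreign_keys dataset out) := by unfold Spec_fix_many_foreign_keys; infer_instance

-- ===== CLAIM (what is proved, stated in full; the proofs are below) =====
def Claim_equal_fix_many_foreign_keys : Prop := ∀ (dataset : List (List (String × String))), Dom_fix_many_foreign_keys dataset → Pre_fix_many_foreign_keys dataset → Spec_fix_many_foreign_keys dataset (fix_many_foreign_keys dataset)

-- ===== LEMMAS AND PROOFS =====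

lemma pvScan_nil (rules : List (List Char × List Char)) : pvScan rules [] = [] := by
  rw [pvScan]

lemma pvScan_cons_none (rules : List (List Char × List Char)) (c : Char) (t : List Char)
    (h : pvTryRules rules (c :: t) = none) : pvScan rules (c :: t) = c :: pvScan rules t := by
  rw [pvScan, h]

lemma pvScan_cons_some (rules : List (List Char × List Char)) (c : Char) (t : List Char)
    (r : List Char) (n : Nat) (h : pvTryRules rules (c :: t) = some (r, n)) :
    pvScan rules (c :: t) = r ++ pvScan rules (t.drop (n - 1)) := by
  rw [pvScan, h]

lemma pvScan_eq_some (rules : List (List Char × List Char)) (s r : List Char) (n : Nat)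
    (hs : s ≠ []) (h : pvTryRules rules s = some (r, n)) (hn : 0 < n) :
    pvScan rules s = r ++ pvScan rules (s.drop n) := by
  cases s with
  | nil => exact absurd rfl hs
  | cons c t =>
      rw [pvScan_cons_some rules c t r n h]
      obtain ⟨m, rfl⟩ : ∃ m, n = m + 1 := ⟨n - 1, by omega⟩
      simp

lemma pvTryRules_eq_none_iff (rules : List (List Char × List Char)) (s : List Char) :
    pvTryRules rules s = none ↔ ∀ pr ∈ rules, ¬ pr.1 <+: s := by
  induction rules with
  | nil => simp [pvTryRules]
  | cons pr rest ih =>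
      by_cases h : pr.1.isPrefixOf s
      · simp [pvTryRules, h]
        intro hc
        exact absurd (List.isPrefixOf_iff_prefix.mp h) hc
      · simp [pvTryRules, h, ih]
        intro _
        exact fun hc => h (List.isPrefixOf_iff_prefix.mpr hc)

lemma pvTryRules_eq_some (rules : List (List Char × List Char)) (s r : List Char) (n : Nat)
    (h : pvTryRules rules s = some (r, n)) :
    ∃ pr ∈ rules, pr.2 = r ∧ pr.1.length = n ∧ pr.1 <+: s := by
  induction rules with
  | nil => simp [pvTryRules] at h
  | cons pr rest ih =>
      by_cases hp : pr.1.isPrefixOf s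
      · simp [pvTryRules, hp] at h
        exact ⟨pr, List.mem_cons_self, h.1, h.2, List.isPrefixOf_iff_prefix.mp hp⟩
      · simp only [pvTryRules, hp, if_false] at h
        obtain ⟨pr', hmem, h1, h2, h3⟩ := ih h
        exact ⟨pr', List.mem_cons_of_mem _ hmem, h1, h2, h3⟩

lemma pvTryRules_append_some (xs ys : List (List Char × List Char)) (s : List Char)
    (o : List Char × Nat) (h : pvTryRules xs s = some o) :
    pvTryRules (xs ++ ys) s = some o := by
  induction xs with
  | nil => simp [pvTryRules] at h
  | cons pr rest ih =>
      by_cases hp : pr.1.isPrefixOf s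
      · simp_all [pvTryRules, hp]
      · simp_all [pvTryRules, hp]

lemma pvTryRules_append_none (xs ys : List (List Char × List Char)) (s : List Char)
    (h : pvTryRules xs s = none) :
    pvTryRules (xs ++ ys) s = pvTryRules ys s := by
  induction xs with
  | nil => simp [pvTryRules]
  | cons pr rest ih =>
      by_cases hp : pr.1.isPrefixOf s
      · simp [pvTryRules, hp] at h
      · simp only [pvTryRules, hp, if_false] at h ⊢
        simp only [List.cons_append, pvTryRules, hp, if_false]
        exact ih h

-- a prefix of u ++ v is comparable with u
lemma pv_prefix_append_cases {p u v : List Char} (h : p <+: u ++ v) : p <+: u ∨ u <+: p :=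
  List.prefix_or_prefix_of_prefix h (List.prefix_append u v)

-- a block u in which no rule pattern can start passes through the scan unchanged
lemma pvScan_append (rules : List (List Char × List Char)) :
    ∀ (u v : List Char),
    (∀ j < u.length, ∀ pr ∈ rules, ¬ (pr.1 <+: u.drop j) ∧ ¬ (u.drop j <+: pr.1)) →
    pvScan rules (u ++ v) = u ++ pvScan rules v := by
  intro u
  induction u with
  | nil => intro v _; simp
  | cons c u' ih =>
      intro v h
      have hnone : pvTryRules rules (c :: (u' ++ v)) = none := by
        rw [pvTryRules_eq_none_iff]
        intro pr hpr hp
        have h0 := h 0 (by simp) pr hpr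
        simp only [List.drop_zero] at h0
        have : pr.1 <+: (c :: u') ++ v := by simpa using hp
        rcases pv_prefix_append_cases this with hc | hc
        · exact h0.1 hc
        · exact h0.2 hc
      have : pvScan rules ((c :: u') ++ v) = c :: pvScan rules (u' ++ v) := by
        simpa using pvScan_cons_none rules c (u' ++ v) hnone
      rw [this, ih v (fun j hj pr hpr => by
        have := h (j + 1) (by simpa using Nat.succ_lt_succ hj) pr hpr
        simpa using this)]
      simp

-- a prefix of the scan's output is either a prefix of the input or runs into some replacement text
lemma pvScan_prefix (rules : List (List Char × List Char)) :
    ∀ (fuel : Nat) (t q : List Char), t.length ≤ fuel → q <+: pvScan rules t →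
    q <+: t ∨ ∃ j < q.length, ∃ pr ∈ rules, (q.drop j <+: pr.2 ∨ pr.2 <+: q.drop j) := by
  intro fuel
  induction fuel with
  | zero =>
      intro t q hlen hpre
      have : t = [] := List.length_eq_zero_iff.mp (Nat.le_zero.mp hlen)
      subst this
      rw [pvScan_nil] at hpre
      left; simpa using hpre
  | succ fuel ih =>
      intro t q hlen hpre
      cases t with
      | nil =>
          rw [pvScan_nil] at hpre
          left; simpa using hpre
      | cons c t0 =>
          rcases hq : q with _ | ⟨qc, q0⟩
          · left; exact List.nil_prefix
          subst hq
          cases htry : pvTryRules rules (c :: t0) with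
          | some o =>
              obtain ⟨r, n⟩ := o
              obtain ⟨pr, hpr, hr2, hn, hp⟩ := pvTryRules_eq_some rules _ r n htry
              rw [pvScan_cons_some rules c t0 r n htry] at hpre
              rcases pv_prefix_append_cases hpre with hc | hc
              · exact Or.inr ⟨0, by simp, pr, hpr, Or.inl (by simpa [hr2] using hc)⟩
              · exact Or.inr ⟨0, by simp, pr, hpr, Or.inr (by simpa [hr2] using hc)⟩
          | none =>
              rw [pvScan_cons_none rules c t0 htry] at hpre
              rw [List.cons_prefix_cons] at hpre
              obtain ⟨rfl, hq0⟩ := hpre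
              rcases ih t0 q0 (by simpa using Nat.succ_le_succ_iff.mp hlen) hq0 with hc | ⟨j, hj, pr, hpr, hd⟩
              · left; exact List.cons_prefix_cons.mpr ⟨rfl, hc⟩
              · exact Or.inr ⟨j + 1, by simpa using Nat.succ_lt_succ hj, pr, hpr, by simpa using hd⟩

-- the scan for one extra rule, run after the scan for `rules`, is the scan for all of them
lemma pvScan_compose (rules : List (List Char × List Char)) (rk : List Char × List Char)
    (hne : rk.1 ≠ []) (hrs : ∀ pr ∈ rules, pr.1 ≠ [])
    (H1 : ∀ pr ∈ rules, ∀ j < pr.2.length, ¬ (rk.1 <+: pr.2.drop j) ∧ ¬ (pr.2.drop j <+: rk.1))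
    (H2 : ∀ j < rk.1.length, ∀ pr ∈ rules, ¬ (pr.1 <+: rk.1.drop j) ∧ ¬ (rk.1.drop j <+: pr.1))
    (H3 : ∀ j < rk.1.length, 0 < j → ∀ pr ∈ rules, ¬ (rk.1.drop j <+: pr.2) ∧ ¬ (pr.2 <+: rk.1.drop j)) :
    ∀ (fuel : Nat) (s : List Char), s.length ≤ fuel →
    pvScan [rk] (pvScan rules s) = pvScan (rules ++ [rk]) s := by
  intro fuel
  induction fuel with
  | zero =>
      intro s hlen
      have : s = [] := List.length_eq_zero_iff.mp (Nat.le_zero.mp hlen)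
      subst this
      simp [pvScan_nil]
  | succ fuel ih =>
      intro s hlen
      cases s with
      | nil => simp [pvScan_nil]
      | cons c t =>
          cases htry : pvTryRules rules (c :: t) with
          | some o =>
              obtain ⟨r, n⟩ := o
              obtain ⟨pr, hpr, hr2, hn, hp⟩ := pvTryRules_eq_some rules _ r n htry
              have hnpos : 0 < n := by
                have := hrs pr hpr
                cases hpr1 : pr.1 with
                | nil => exact absurd hpr1 this
                | cons a b => rw [← hn, hpr1]; simp
              rw [pvScan_cons_some rules c t r n htry]
              rw [pvScan_append [rk] r (pvScan rules (t.drop (n - 1)))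
                    (by
                      intro j hj pr' hpr'
                      have : pr' = rk := by simpa using hpr'
                      subst this
                      exact H1 pr hpr j (by simpa [hr2] using hj) |>.imp
                        (fun h => by simpa [hr2] using h) (fun h => by simpa [hr2] using h))]
              rw [ih (t.drop (n - 1)) (by simp at hlen ⊢; omega)]
              rw [pvScan_cons_some (rules ++ [rk]) c t r n (pvTryRules_append_some rules [rk] _ _ htry)]
          | none =>
              cases htk : pvTryRules [rk] (c :: t) with
              | some o =>
                  obtain ⟨r, n⟩ := o
                  have hpp : rk.1.isPrefixOf (c :: t) = true := by
                    by_contra hc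
                    rw [show pvTryRules [rk] (c :: t) = none from by
                      simp [pvTryRules, Bool.eq_false_iff.mpr hc]] at htk
                    exact absurd htk (by simp)
                  have heq : pvTryRules [rk] (c :: t) = some (rk.2, rk.1.length) := by
                    simp [pvTryRules, hpp]
                  have hrn := heq.symm.trans htk
                  simp only [Option.some.injEq, Prod.mk.injEq] at hrn
                  obtain ⟨hr, hn⟩ := hrn
                  subst hr
                  subst hn
                  have hp : rk.1 <+: (c :: t) := List.isPrefixOf_iff_prefix.mp hpp
                  obtain ⟨s'', hs⟩ := hp
                  have hscan : pvScan rules (c :: t) = rk.1 ++ pvScan rules s'' := by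
                    rw [← hs]
                    exact pvScan_append rules rk.1 s''
                      (fun j hj pr hpr => H2 j hj pr hpr)
                  rw [hscan]
                  have hlen1 : 0 < rk.1.length := by
                    cases hr : rk.1 with
                    | nil => exact absurd hr hne
                    | cons a b => simp [hr]
                  have htk2 : pvTryRules [rk] (rk.1 ++ pvScan rules s'') = some (rk.2, rk.1.length) := by
                    have : rk.1.isPrefixOf (rk.1 ++ pvScan rules s'') :=
                      List.isPrefixOf_iff_prefix.mpr (List.prefix_append _ _)
                    simp [pvTryRules, this]
                  rw [pvScan_eq_some [rk] _ _ _
                        (by intro hc; exact hne (List.append_eq_nil_iff.mp hc).1) htk2 hlen1]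
                  rw [List.drop_left]
                  have hs''len : s''.length ≤ fuel := by
                    have h2 : rk.1.length + s''.length = (c :: t).length := by
                      rw [← hs]; simp
                    simp only [List.length_cons] at h2 hlen
                    omega
                  rw [ih s'' hs''len]
                  have htkall : pvTryRules (rules ++ [rk]) (c :: t) = some (rk.2, rk.1.length) := by
                    rw [pvTryRules_append_none rules [rk] _ htry]
                    exact htk
                  rw [pvScan_eq_some (rules ++ [rk]) _ _ _ (by simp) htkall hlen1]
                  congr 1
                  rw [← hs, List.drop_left]
              | none =>
                  have hsc : pvScan rules (c :: t) = c :: pvScan rules t :=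
                    pvScan_cons_none rules c t htry
                  rw [hsc]
                  have hnomatch : pvTryRules [rk] (c :: pvScan rules t) = none := by
                    rw [pvTryRules_eq_none_iff]
                    intro pr' hpr' hcon
                    rw [show pr' = rk from by simpa using hpr'] at hcon
                    have hknp : ¬ rk.1 <+: (c :: t) := by
                      have := (pvTryRules_eq_none_iff [rk] (c :: t)).mp htk
                      simpa using this rk (by simp)
                    cases hr : rk.1 with
                    | nil => exact hne hr
                    | cons c1 q =>
                        rw [hr, List.cons_prefix_cons] at hcon
                        obtain ⟨rfl, hq⟩ := hcon
                        rcases pvScan_prefix rules t.length t q le_rfl hq with hc | ⟨j, hj, pr, hpr, hd⟩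
                        · exact hknp (by rw [hr]; exact List.cons_prefix_cons.mpr ⟨rfl, hc⟩)
                        · have hjlt : j + 1 < rk.1.length := by simp [hr]; omega
                          have := H3 (j + 1) hjlt (by omega) pr hpr
                          have hdr : rk.1.drop (j + 1) = q.drop j := by simp [hr]
                          rw [hdr] at this
                          rcases hd with hd | hd
                          · exact this.1 hd
                          · exact this.2 hd
                  rw [pvScan_cons_none [rk] c (pvScan rules t) hnomatch]
                  rw [ih t (by simpa using Nat.succ_le_succ_iff.mp hlen)]
                  have : pvTryRules (rules ++ [rk]) (c :: t) = none := by
                    rw [pvTryRules_append_none rules [rk] _ htry]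
                    exact htk
                  rw [pvScan_cons_none (rules ++ [rk]) c t this]

-- PySem.Chars.replace IS the one-rule scan
lemma pvReplace_go_eq (old new : List Char) (hne : old ≠ []) :
    ∀ (fuel : Nat) (l acc : List Char), l.length ≤ fuel →
    PySem.Chars.replace.go old new fuel l acc = acc.reverse ++ pvScan [(old, new)] l := by
  intro fuel
  induction fuel with
  | zero =>
      intro l acc hlen
      have : l = [] := List.length_eq_zero_iff.mp (Nat.le_zero.mp hlen)
      subst this
      simp [PySem.Chars.replace.go, pvScan_nil]
  | succ fuel ih =>
      intro l acc hlen
      cases l with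
      | nil => simp [PySem.Chars.replace.go, pvScan_nil]
      | cons c t =>
          by_cases hp : old.isPrefixOf (c :: t)
          · have hlold : 0 < old.length := by
              cases h : old with
              | nil => exact absurd h hne
              | cons a b => simp [h]
            have hstep : PySem.Chars.replace.go old new (fuel + 1) (c :: t) acc =
                PySem.Chars.replace.go old new fuel ((c :: t).drop old.length) (new.reverse ++ acc) := by
              simp [PySem.Chars.replace.go, hp]
            rw [hstep, ih _ _ (by simp at hlen ⊢; omega)]
            have htr : pvTryRules [(old, new)] (c :: t) = some (new, old.length) := by
              simp [pvTryRules, hp]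
            rw [pvScan_eq_some [(old, new)] _ _ _ (by simp) htr hlold]
            simp
          · have hstep : PySem.Chars.replace.go old new (fuel + 1) (c :: t) acc =
                PySem.Chars.replace.go old new fuel t (c :: acc) := by
              simp [PySem.Chars.replace.go, hp]
            rw [hstep, ih _ _ (by simpa using Nat.succ_le_succ_iff.mp hlen)]
            have htr : pvTryRules [(old, new)] (c :: t) = none := by
              simp [pvTryRules, hp]
            rw [pvScan_cons_none _ _ _ htr]
            simp

lemma pvReplace_eq_pvScan (s old new : List Char) (hne : old ≠ []) :
    PySem.Chars.replace s old new = pvScan [(old, new)] s := by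
  rw [PySem.Chars.replace]
  rw [if_neg (by simpa [List.isEmpty_iff] using hne)]
  simpa using pvReplace_go_eq old new hne s.length s [] le_rfl

-- the four sequential replaces equal the one-pass scan over all four rules
lemma pvQuad_eq (cs : List Char) :
    PySem.Chars.replace (PySem.Chars.replace (PySem.Chars.replace (PySem.Chars.replace cs
      "mzjzjlb.YLJGDM = jybgb.YLJGDM".toList "mzjzjlb.YLJGDM = jybgb.YLJGDM_MZJZJLB".toList)
      "zyjzjlb.YLJGDM = jybgb.YLJGDM".toList "zyjzjlb.YLJGDM = jybgb.YLJGDM_ZYJZJLB".toList)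
      "mzjzjlb.JZLSH = jybgb.JZLSH".toList "mzjzjlb.JZLSH = jybgb.JZLSH_MZJZJLB".toList)
      "zyjzjlb.JZLSH = jybgb.JZLSH".toList "zyjzjlb.JZLSH = jybgb.JZLSH_ZYJZJLB".toList
    = pvScan pvRulesB cs := by
  rw [pvReplace_eq_pvScan _ _ _ (by decide), pvReplace_eq_pvScan _ _ _ (by decide),
      pvReplace_eq_pvScan _ _ _ (by decide), pvReplace_eq_pvScan _ _ _ (by decide)]
  rw [pvScan_compose _ _ (by decide) (by decide) (by decide) (by decide) (by decide) cs.length cs le_rfl]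
  rw [pvScan_compose _ _ (by decide) (by decide) (by decide) (by decide) (by decide) cs.length cs le_rfl]
  rw [pvScan_compose _ _ (by decide) (by decide) (by decide) (by decide) (by decide) cs.length cs le_rfl]
  rfl

lemma pvDictMkItems {κ ν : Type} (d : PySem.Dict κ ν) : PySem.Dict.mk d.items = d := rfl

-- the four chained dict updates of A collapse to B's single update
lemma pvItemA_eq (item : List (String × String)) :
    fkRules.foldl pvStepA item =
    ((PySem.Dict.mk item).insert "sql"
      (String.ofList (pvScan pvRulesB ((PySem.Dict.mk item).getD "sql" "").toList))).items := by
  simp only [fkRules, List.foldl_cons, List.foldl_nil, pvStepA]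
  simp only [pvDictMkItems]
  simp only [PySem.Dict.getD_insert_self, PySem.Dict.insert_insert_self]
  have hstr : ∀ v : String,
      PySem.Str.replace (PySem.Str.replace (PySem.Str.replace (PySem.Str.replace v
        "mzjzjlb.YLJGDM = jybgb.YLJGDM" "mzjzjlb.YLJGDM = jybgb.YLJGDM_MZJZJLB")
        "zyjzjlb.YLJGDM = jybgb.YLJGDM" "zyjzjlb.YLJGDM = jybgb.YLJGDM_ZYJZJLB")
        "mzjzjlb.JZLSH = jybgb.JZLSH" "mzjzjlb.JZLSH = jybgb.JZLSH_MZJZJLB")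
        "zyjzjlb.JZLSH = jybgb.JZLSH" "zyjzjlb.JZLSH = jybgb.JZLSH_ZYJZJLB"
      = String.ofList (pvScan pvRulesB v.toList) := by
    intro v
    simp only [PySem.Str.replace, String.toList_ofList]
    exact congrArg String.ofList (pvQuad_eq v.toList)
  rw [hstr]

-- the inner rule loop at one index is a single set at that index
lemma pvInnerFold (rs : List (String × String)) :
    ∀ (ds : List (List (String × String))) (i : Int), 0 ≤ i → i.toNat < ds.length →
    rs.foldl (fun ds' fk => ds'.set i.toNat (pvStepA (PySem.List.pyGetD ds' i []) fk)) ds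
      = ds.set i.toNat (rs.foldl pvStepA (PySem.List.pyGetD ds i [])) := by
  induction rs with
  | nil =>
      intro ds i h0 h1
      simp only [List.foldl_nil]
      rw [PySem.List.pyGetD_eq_getElem ds [] h0 (by omega)]
      rw [List.set_getElem_self]
  | cons fk rs ih =>
      intro ds i h0 h1
      simp only [List.foldl_cons]
      rw [ih _ i h0 (by simpa using h1)]
      have hget : PySem.List.pyGetD (ds.set i.toNat (pvStepA (PySem.List.pyGetD ds i []) fk)) i []
          = pvStepA (PySem.List.pyGetD ds i []) fk := by
        rw [PySem.List.pyGetD_eq_getElem _ [] h0 (by simp; omega)]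
        simp
      rw [hget, List.set_set]

-- the outer index loop is a map
lemma pvOuterA :
    ∀ (ds pref : List (List (String × String))),
    (PySem.List.pyRange (pref.length : Int) ((pref.length : Int) + (ds.length : Int))).foldl
      (fun ds i =>
        fkRules.foldl
          (fun ds' fk => ds'.set i.toNat (pvStepA (PySem.List.pyGetD ds' i []) fk)) ds)
      (pref ++ ds)
    = pref ++ ds.map (fun item => fkRules.foldl pvStepA item) := by
  intro ds
  induction ds with
  | nil => intro pref; simp [PySem.List.pyRange]
  | cons x t ih =>
      intro pref
      have hcons : (pref.length : Int) < (pref.length : Int) + ((x :: t).length : Int) := by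
        push_cast [List.length_cons]; omega
      rw [PySem.List.pyRange_one_cons hcons]
      simp only [List.foldl_cons]
      have h0 : (0 : Int) ≤ (pref.length : Int) := by exact_mod_cast Nat.zero_le _
      have htn : ((pref.length : Int)).toNat = pref.length := by simp
      have hlenN : pref.length < (pref ++ x :: t).length := by
        simp only [List.length_append, List.length_cons]; omega
      have hget : PySem.List.pyGetD (pref ++ x :: t) (pref.length : Int) [] = x := by
        rw [PySem.List.pyGetD_eq_getElem _ [] h0 (by exact_mod_cast hlenN)]
        have hg0 : (pref ++ x :: t)[pref.length]'hlenN = x := by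
          rw [List.getElem_append_right le_rfl]
          simp
        simpa using hg0
      have hbody :
          fkRules.foldl
            (fun ds' fk => ds'.set ((pref.length : Int)).toNat (pvStepA (PySem.List.pyGetD ds' (pref.length : Int) []) fk))
            (pref ++ x :: t)
          = pref ++ (fkRules.foldl pvStepA x) :: t := by
        rw [pvInnerFold fkRules (pref ++ x :: t) (pref.length : Int) h0 (by rw [htn]; exact hlenN)]
        rw [hget, htn, List.set_append_right _ _ le_rfl]
        simp
      rw [hbody]
      have hth := ih (pref ++ [fkRules.foldl pvStepA x])
      have e1 : ((pref ++ [fkRules.foldl pvStepA x]).length : Int) + (t.length : Int)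
          = (pref.length : Int) + ((x :: t).length : Int) := by
        push_cast [List.length_append, List.length_cons, List.length_nil]; omega
      have e2 : ((pref ++ [fkRules.foldl pvStepA x]).length : Int) = (pref.length : Int) + 1 := by
        push_cast [List.length_append, List.length_cons, List.length_nil]; omega
      rw [e1, e2] at hth
      rw [show (pref ++ [fkRules.foldl pvStepA x]) ++ t = pref ++ fkRules.foldl pvStepA x :: t by simp] at hth
      rw [hth]
      simp

-- ===== VERDICT (by name: the statement is the Claim_ definition above) =====
theorem fix_many_foreign_keys_spec : Claim_equal_fix_many_foreign_keys := by
  intro dataset _ _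
  unfold Spec_fix_many_foreign_keys fix_many_foreign_keys fix_many_foreign_keys_alt
  have h := pvOuterA dataset []
  simp only [List.length_nil, Nat.cast_zero, List.nil_append, zero_add] at h
  rw [h]
  exact List.map_congr_left (fun item _ => pvItemA_eq item)
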